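-- pv_equiv track=rewrite | github.com/codes1gn/croqtile-tuner | monitor/backend/app/artifact_scanner.py | _normalize_dtype
-- ===== SOURCE A (Python) =====
-- _CANONICAL_DTYPE = {
--     "f16": "fp16", "f32": "fp32", "f64": "fp64",
--     "fp16": "fp16", "fp32": "fp32", "fp64": "fp64",
--     "bf16": "bf16",
--     "e4m3": "e4m3", "e5m2": "e5m2",
--     "int8": "int8", "int16": "int16", "int32": "int32", "int64": "int64",
-- }
--
-- def _normalize_dtype(raw: str) -> str:
--     """Normalize a compound dtype to canonical form.
--
--     e.g. 'f16f32' → 'fp16fp32', 'f16fp32' → 'fp16fp32', 'fp16' → 'fp16'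
--     """
--     low = raw.lower()
--     tokens = sorted(_CANONICAL_DTYPE.keys(), key=len, reverse=True)
--     result = []
--     pos = 0
--     while pos < len(low):
--         matched = False
--         for tok in tokens:
--             if low[pos:].startswith(tok):
--                 result.append(_CANONICAL_DTYPE[tok])
--                 pos += len(tok)
--                 matched = True
--                 break
--         if not matched:
--             result.append(low[pos])
--             pos += 1
--     return "".join(result)
-- ===== SOURCE B (Python) =====
-- def _normalize_dtype(raw: str) -> str:
--     """Normalize a compound dtype to canonical form.
--
--     The canonical map is the identity on every key except f16/f32/f64,
--     so: lowercase, protect 'bf16' (whose inner 'f16' must stay) by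
--     splitting on it, rewrite f16/f32/f64 globally in each segment with
--     staged str.replace passes, and stitch the segments back together.
--     """
--     low = raw.lower()
--     return "bf16".join(
--         seg.replace("f16", "fp16").replace("f32", "fp32").replace("f64", "fp64")
--         for seg in low.split("bf16")
--     )
-- ===== Notes on version B (the rewrite author's own statement) =====
-- stated objective: faster
-- what changed: Replaces the per-position greedy scan over the 13 sorted tokens (each step slicing the whole suffix low[pos:]) by staged global string rewriting: the canonical map is the identity on every key except f16/f32/f64, so B lowercases, splits on 'bf16' to protect its inner 'f16', applies three global str.replace passes per segment and rejoins with 'bf16'.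
import Mathlib
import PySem

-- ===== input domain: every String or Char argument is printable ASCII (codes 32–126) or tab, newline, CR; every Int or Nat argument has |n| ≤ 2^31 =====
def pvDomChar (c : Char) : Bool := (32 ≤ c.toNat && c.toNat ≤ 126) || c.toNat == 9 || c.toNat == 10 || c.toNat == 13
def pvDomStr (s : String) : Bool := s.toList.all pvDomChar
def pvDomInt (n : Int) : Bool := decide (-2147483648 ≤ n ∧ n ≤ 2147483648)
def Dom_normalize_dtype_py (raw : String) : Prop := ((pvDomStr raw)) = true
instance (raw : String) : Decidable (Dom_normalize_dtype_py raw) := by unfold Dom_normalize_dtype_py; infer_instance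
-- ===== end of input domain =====

-- B replaces A's per-position greedy scan over the sorted token table by staged global
-- string rewriting: the map is the identity except f16/f32/f64, so B splits on "bf16"
-- (protecting its inner "f16"), rewrites f16/f32/f64 per segment and rejoins; same value.

-- ===== PORT A =====
-- the module constant _CANONICAL_DTYPE
def canonA : PySem.Dict String String := PySem.Dict.ofList
  [("f16","fp16"),("f32","fp32"),("f64","fp64"),
   ("fp16","fp16"),("fp32","fp32"),("fp64","fp64"),
   ("bf16","bf16"),
   ("e4m3","e4m3"),("e5m2","e5m2"),
   ("int8","int8"),("int16","int16"),("int32","int32"),("int64","int64")]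

-- tokens = sorted(_CANONICAL_DTYPE.keys(), key=len, reverse=True)
def tokensA : List String := PySem.List.sorted canonA.keys (fun t => PySem.Str.len t) true

-- the inner `for tok in tokens: if low[pos:].startswith(tok): … break`, returning the
-- appended canonical string and the amount added to pos.  `_CANONICAL_DTYPE[tok]` is ported
-- as getD with default "" (the key is always a dict key here, so Python's KeyError path is
-- unreachable).
def aMatch : List String → List Char → Option (String × Nat)
  | [], _ => none
  | tok :: ts, rem =>
      if PySem.Chars.startswith rem tok.toList then
        some (PySem.Dict.getD canonA tok "", tok.toList.length)
      else aMatch ts rem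

-- needed by aGo's termination: a match consumes between 1 and len(rem) characters
theorem aMatch_bounds : ∀ (ts : List String) (rem : List Char) (ck : String × Nat),
    aMatch ts rem = some ck → (∀ t ∈ ts, t.toList ≠ []) → 1 ≤ ck.2 ∧ ck.2 ≤ rem.length := by
  intro ts
  induction ts with
  | nil => intro rem ck h _; simp [aMatch] at h
  | cons tok ts ih =>
    intro rem ck h hne
    by_cases hs : PySem.Chars.startswith rem tok.toList
    · simp [aMatch, hs] at h
      subst h
      have hpre : tok.toList <+: rem := (PySem.Chars.startswith_iff rem tok.toList).mp hs
      have hlen : tok.toList.length ≤ rem.length := hpre.length_le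
      have hne' : tok.toList ≠ [] := hne tok (by simp)
      have : 1 ≤ tok.toList.length := by
        cases h' : tok.toList with
        | nil => exact absurd h' hne'
        | cons _ _ => simp
      exact ⟨this, hlen⟩
    · simp [aMatch, hs] at h
      exact ih rem ck h (fun t ht => hne t (by simp [ht]))

-- A's while-loop, recursing on the remaining suffix low[pos:]
def aGo (rem : List Char) : List Char :=
  match hm : aMatch tokensA rem with
  | some ck => ck.1.toList ++ aGo (rem.drop ck.2)
  | none =>
      match rem with
      | [] => []
      | c :: r => c :: aGo r
termination_by rem.length
decreasing_by
  · have := aMatch_bounds tokensA rem ck hm (by decide)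
    simp; omega
  · simp

def normalize_dtype_py (raw : String) : String :=
  String.ofList (aGo (PySem.Str.lower raw).toList)

-- ===== PORT B =====
-- low.split("bf16"): the separator is the nonempty literal "bf16", so Python's split(sep)
-- is PySem.Chars.splitOn (the sep ≠ "" form of split).
def normalize_dtype_py_alt (raw : String) : String :=
  let low := PySem.Str.lower raw
  PySem.Str.join "bf16"
    ((PySem.Chars.splitOn low.toList ("bf16" : String).toList).map
      (fun seg =>
        PySem.Str.replace
          (PySem.Str.replace
            (PySem.Str.replace (String.ofList seg) "f16" "fp16") "f32" "fp32") "f64" "fp64"))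

-- ===== PRECONDITION & SPEC =====
def Spec_normalize_dtype_py (raw : String) (out : String) : Prop := out = normalize_dtype_py_alt raw
instance (raw : String) (out : String) : Decidable (Spec_normalize_dtype_py raw out) := by unfold Spec_normalize_dtype_py; infer_instance

-- ===== CLAIM (what is proved, stated in full; the proofs are below) =====
def Claim_equal_normalize_dtype_py : Prop := ∀ (raw : String), Dom_normalize_dtype_py raw → Spec_normalize_dtype_py raw (normalize_dtype_py raw)

-- ===== LEMMAS AND PROOFS =====

-- the common single-pass specification both ports are proved equal to:
-- copy characters, keep "bf16" atomically, rewrite f16/f32/f64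
def nrm (l : List Char) : List Char :=
  if h0 : PySem.Chars.startswith l ['b','f','1','6'] then ['b','f','1','6'] ++ nrm (l.drop 4)
  else if h1 : PySem.Chars.startswith l ['f','1','6'] then ['f','p','1','6'] ++ nrm (l.drop 3)
  else if h2 : PySem.Chars.startswith l ['f','3','2'] then ['f','p','3','2'] ++ nrm (l.drop 3)
  else if h3 : PySem.Chars.startswith l ['f','6','4'] then ['f','p','6','4'] ++ nrm (l.drop 3)
  else match l with
       | [] => []
       | c :: t => c :: nrm t
termination_by l.length
decreasing_by
  · have := ((PySem.Chars.startswith_iff _ _).mp h0).length_le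
    simp at this ⊢; omega
  · have := ((PySem.Chars.startswith_iff _ _).mp h1).length_le
    simp at this ⊢; omega
  · have := ((PySem.Chars.startswith_iff _ _).mp h2).length_le
    simp at this ⊢; omega
  · have := ((PySem.Chars.startswith_iff _ _).mp h3).length_le
    simp at this ⊢; omega
  · simp

-- norm unfolding lemmas
theorem nrm_nil : nrm [] = [] := by rw [nrm]; simp [PySem.Chars.startswith, List.isPrefixOf]

theorem nrm_cons_of_not (c : Char) (t : List Char)
    (h0 : ¬ PySem.Chars.startswith (c :: t) ['b','f','1','6'] = true)
    (h1 : ¬ PySem.Chars.startswith (c :: t) ['f','1','6'] = true)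
    (h2 : ¬ PySem.Chars.startswith (c :: t) ['f','3','2'] = true)
    (h3 : ¬ PySem.Chars.startswith (c :: t) ['f','6','4'] = true) :
    nrm (c :: t) = c :: nrm t := by
  rw [nrm]; simp [h0, h1, h2, h3]

theorem nrm_copy (c : Char) (t : List Char) (hb : c ≠ 'b') (hf : c ≠ 'f') :
    nrm (c :: t) = c :: nrm t := by
  apply nrm_cons_of_not <;>
    simp [PySem.Chars.startswith, List.isPrefixOf] <;> intro h <;> simp [h.symm] at hb hf

theorem nrm_bf16 (t : List Char) :
    nrm ('b'::'f'::'1'::'6'::t) = 'b'::'f'::'1'::'6':: nrm t := by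
  rw [nrm]; simp [PySem.Chars.startswith, List.isPrefixOf]

theorem nrm_f16 (t : List Char) :
    nrm ('f'::'1'::'6'::t) = 'f'::'p'::'1'::'6':: nrm t := by
  rw [nrm]; simp [PySem.Chars.startswith, List.isPrefixOf]

theorem nrm_f32 (t : List Char) :
    nrm ('f'::'3'::'2'::t) = 'f'::'p'::'3'::'2':: nrm t := by
  rw [nrm]; simp [PySem.Chars.startswith, List.isPrefixOf]

theorem nrm_f64 (t : List Char) :
    nrm ('f'::'6'::'4'::t) = 'f'::'p'::'6'::'4':: nrm t := by
  rw [nrm]; simp [PySem.Chars.startswith, List.isPrefixOf]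

theorem nrm_fp (t : List Char) : nrm ('f'::'p'::t) = 'f'::'p':: nrm t := by
  rw [nrm]; simp [PySem.Chars.startswith, List.isPrefixOf, nrm_copy]

-- ===== A = norm =====
theorem aGo_unfold (rem : List Char) : aGo rem = match aMatch tokensA rem with
    | some ck => ck.1.toList ++ aGo (rem.drop ck.2)
    | none => match rem with
      | [] => []
      | c :: r => c :: aGo r := by
  rw [aGo]
  split
  · rename_i ck h; rw [h]
  · rename_i h; cases rem <;> simp [h]

theorem htok : tokensA = ["int16","int32","int64","fp16","fp32","fp64","bf16","e4m3","e5m2","int8","f16","f32","f64"] := by decide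

theorem g1 : (PySem.Dict.getD canonA "f16" "").toList = ['f','p','1','6'] := by decide
theorem g2 : (PySem.Dict.getD canonA "f32" "").toList = ['f','p','3','2'] := by decide
theorem g3 : (PySem.Dict.getD canonA "f64" "").toList = ['f','p','6','4'] := by decide
theorem g4 : (PySem.Dict.getD canonA "fp16" "").toList = ['f','p','1','6'] := by decide
theorem g5 : (PySem.Dict.getD canonA "fp32" "").toList = ['f','p','3','2'] := by decide
theorem g6 : (PySem.Dict.getD canonA "fp64" "").toList = ['f','p','6','4'] := by decide
theorem g7 : (PySem.Dict.getD canonA "bf16" "").toList = ['b','f','1','6'] := by decide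
theorem g8 : (PySem.Dict.getD canonA "e4m3" "").toList = ['e','4','m','3'] := by decide
theorem g9 : (PySem.Dict.getD canonA "e5m2" "").toList = ['e','5','m','2'] := by decide
theorem g10 : (PySem.Dict.getD canonA "int8" "").toList = ['i','n','t','8'] := by decide
theorem g11 : (PySem.Dict.getD canonA "int16" "").toList = ['i','n','t','1','6'] := by decide
theorem g12 : (PySem.Dict.getD canonA "int32" "").toList = ['i','n','t','3','2'] := by decide
theorem g13 : (PySem.Dict.getD canonA "int64" "").toList = ['i','n','t','6','4'] := by decide

theorem nrm_int16 (t : List Char) :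
    nrm ('i'::'n'::'t'::'1'::'6'::t) = 'i'::'n'::'t'::'1'::'6':: nrm t := by
  rw [nrm_copy _ _ (by decide) (by decide), nrm_copy _ _ (by decide) (by decide),
      nrm_copy _ _ (by decide) (by decide), nrm_copy _ _ (by decide) (by decide),
      nrm_copy _ _ (by decide) (by decide)]
theorem nrm_int32 (t : List Char) :
    nrm ('i'::'n'::'t'::'3'::'2'::t) = 'i'::'n'::'t'::'3'::'2':: nrm t := by
  rw [nrm_copy _ _ (by decide) (by decide), nrm_copy _ _ (by decide) (by decide),
      nrm_copy _ _ (by decide) (by decide), nrm_copy _ _ (by decide) (by decide),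
      nrm_copy _ _ (by decide) (by decide)]
theorem nrm_int64 (t : List Char) :
    nrm ('i'::'n'::'t'::'6'::'4'::t) = 'i'::'n'::'t'::'6'::'4':: nrm t := by
  rw [nrm_copy _ _ (by decide) (by decide), nrm_copy _ _ (by decide) (by decide),
      nrm_copy _ _ (by decide) (by decide), nrm_copy _ _ (by decide) (by decide),
      nrm_copy _ _ (by decide) (by decide)]
theorem nrm_int8 (t : List Char) :
    nrm ('i'::'n'::'t'::'8'::t) = 'i'::'n'::'t'::'8':: nrm t := by
  rw [nrm_copy _ _ (by decide) (by decide), nrm_copy _ _ (by decide) (by decide),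
      nrm_copy _ _ (by decide) (by decide), nrm_copy _ _ (by decide) (by decide)]
theorem nrm_e4m3 (t : List Char) :
    nrm ('e'::'4'::'m'::'3'::t) = 'e'::'4'::'m'::'3':: nrm t := by
  rw [nrm_copy _ _ (by decide) (by decide), nrm_copy _ _ (by decide) (by decide),
      nrm_copy _ _ (by decide) (by decide), nrm_copy _ _ (by decide) (by decide)]
theorem nrm_e5m2 (t : List Char) :
    nrm ('e'::'5'::'m'::'2'::t) = 'e'::'5'::'m'::'2':: nrm t := by
  rw [nrm_copy _ _ (by decide) (by decide), nrm_copy _ _ (by decide) (by decide),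
      nrm_copy _ _ (by decide) (by decide), nrm_copy _ _ (by decide) (by decide)]
theorem nrm_fp16 (t : List Char) :
    nrm ('f'::'p'::'1'::'6'::t) = 'f'::'p'::'1'::'6':: nrm t := by
  rw [nrm_fp, nrm_copy _ _ (by decide) (by decide), nrm_copy _ _ (by decide) (by decide)]
theorem nrm_fp32 (t : List Char) :
    nrm ('f'::'p'::'3'::'2'::t) = 'f'::'p'::'3'::'2':: nrm t := by
  rw [nrm_fp, nrm_copy _ _ (by decide) (by decide), nrm_copy _ _ (by decide) (by decide)]
theorem nrm_fp64 (t : List Char) :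
    nrm ('f'::'p'::'6'::'4'::t) = 'f'::'p'::'6'::'4':: nrm t := by
  rw [nrm_fp, nrm_copy _ _ (by decide) (by decide), nrm_copy _ _ (by decide) (by decide)]

set_option maxHeartbeats 4000000 in
theorem aGo_eq_nrm : ∀ (n : Nat) (l : List Char), l.length ≤ n → aGo l = nrm l := by
  intro n
  induction n with
  | zero =>
    intro l hl
    cases l with
    | nil => rw [aGo_unfold]; have h : aMatch tokensA [] = none := by decide
             simp [h, nrm_nil]
    | cons c r => simp at hl
  | succ n ih =>
    intro l hl
    rcases l with _ | ⟨a, _ | ⟨b, _ | ⟨c, _ | ⟨d, _ | ⟨e, t⟩⟩⟩⟩⟩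
    -- length 0
    · rw [aGo_unfold]; have h : aMatch tokensA [] = none := by decide
      simp [h, nrm_nil]
    -- length 1
    · rw [aGo_unfold, htok]
      have h : aMatch ["int16","int32","int64","fp16","fp32","fp64","bf16","e4m3","e5m2","int8","f16","f32","f64"] [a] = none := by
        simp [aMatch, PySem.Chars.startswith, List.isPrefixOf]
      rw [h, nrm]
      simp [PySem.Chars.startswith, List.isPrefixOf, nrm_nil, ih [] (by simp)]
    -- length 2
    · have ih1 : aGo [b] = nrm [b] := ih [b] (by simp at hl ⊢; omega)
      rw [aGo_unfold, htok]
      have h : aMatch ["int16","int32","int64","fp16","fp32","fp64","bf16","e4m3","e5m2","int8","f16","f32","f64"] [a, b] = none := by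
        simp [aMatch, PySem.Chars.startswith, List.isPrefixOf]
      rw [h, nrm]
      simp [PySem.Chars.startswith, List.isPrefixOf, ih1]
    -- length 3
    · have ih0 : aGo [] = nrm [] := ih [] (by simp)
      have ih2 : aGo [b, c] = nrm [b, c] := ih [b, c] (by simp at hl ⊢; omega)
      rw [aGo_unfold, htok]
      by_cases h11 : 'f' = a ∧ '1' = b ∧ '6' = c
      · obtain ⟨rfl, rfl, rfl⟩ := h11
        simp [aMatch, PySem.Chars.startswith, List.isPrefixOf, g1, nrm_f16, ih0]
      by_cases h12 : 'f' = a ∧ '3' = b ∧ '2' = c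
      · obtain ⟨rfl, rfl, rfl⟩ := h12
        simp [aMatch, PySem.Chars.startswith, List.isPrefixOf, g2, nrm_f32, ih0]
      by_cases h13 : 'f' = a ∧ '6' = b ∧ '4' = c
      · obtain ⟨rfl, rfl, rfl⟩ := h13
        simp [aMatch, PySem.Chars.startswith, List.isPrefixOf, g3, nrm_f64, ih0]
      · have h : aMatch ["int16","int32","int64","fp16","fp32","fp64","bf16","e4m3","e5m2","int8","f16","f32","f64"] [a, b, c] = none := by
          simp [aMatch, PySem.Chars.startswith, List.isPrefixOf, h11, h12, h13]
        rw [h, nrm]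
        simp [PySem.Chars.startswith, List.isPrefixOf, h11, h12, h13, ih2]
    -- length 4
    · have ih0 : aGo [] = nrm [] := ih [] (by simp)
      have ihd : aGo [d] = nrm [d] := ih [d] (by simp at hl ⊢; omega)
      have ih3 : aGo [b, c, d] = nrm [b, c, d] := ih [b, c, d] (by simp at hl ⊢; omega)
      rw [aGo_unfold, htok]
      by_cases h4 : 'f' = a ∧ 'p' = b ∧ '1' = c ∧ '6' = d
      · obtain ⟨rfl, rfl, rfl, rfl⟩ := h4
        simp [aMatch, PySem.Chars.startswith, List.isPrefixOf, g4, nrm_fp16, ih0]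
      by_cases h5 : 'f' = a ∧ 'p' = b ∧ '3' = c ∧ '2' = d
      · obtain ⟨rfl, rfl, rfl, rfl⟩ := h5
        simp [aMatch, PySem.Chars.startswith, List.isPrefixOf, g5, nrm_fp32, ih0]
      by_cases h6 : 'f' = a ∧ 'p' = b ∧ '6' = c ∧ '4' = d
      · obtain ⟨rfl, rfl, rfl, rfl⟩ := h6
        simp [aMatch, PySem.Chars.startswith, List.isPrefixOf, g6, nrm_fp64, ih0]
      by_cases h7 : 'b' = a ∧ 'f' = b ∧ '1' = c ∧ '6' = d
      · obtain ⟨rfl, rfl, rfl, rfl⟩ := h7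
        simp [aMatch, PySem.Chars.startswith, List.isPrefixOf, g7, nrm_bf16, ih0]
      by_cases h8 : 'e' = a ∧ '4' = b ∧ 'm' = c ∧ '3' = d
      · obtain ⟨rfl, rfl, rfl, rfl⟩ := h8
        simp [aMatch, PySem.Chars.startswith, List.isPrefixOf, g8, nrm_e4m3, ih0]
      by_cases h9 : 'e' = a ∧ '5' = b ∧ 'm' = c ∧ '2' = d
      · obtain ⟨rfl, rfl, rfl, rfl⟩ := h9
        simp [aMatch, PySem.Chars.startswith, List.isPrefixOf, g9, nrm_e5m2, ih0]
      by_cases h10 : 'i' = a ∧ 'n' = b ∧ 't' = c ∧ '8' = d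
      · obtain ⟨rfl, rfl, rfl, rfl⟩ := h10
        simp [aMatch, PySem.Chars.startswith, List.isPrefixOf, g10, nrm_int8, ih0]
      by_cases h11 : 'f' = a ∧ '1' = b ∧ '6' = c
      · obtain ⟨rfl, rfl, rfl⟩ := h11
        simp [aMatch, PySem.Chars.startswith, List.isPrefixOf, g1, nrm_f16, ihd]
      by_cases h12 : 'f' = a ∧ '3' = b ∧ '2' = c
      · obtain ⟨rfl, rfl, rfl⟩ := h12
        simp [aMatch, PySem.Chars.startswith, List.isPrefixOf, g2, nrm_f32, ihd]
      by_cases h13 : 'f' = a ∧ '6' = b ∧ '4' = c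
      · obtain ⟨rfl, rfl, rfl⟩ := h13
        simp [aMatch, PySem.Chars.startswith, List.isPrefixOf, g3, nrm_f64, ihd]
      · have h : aMatch ["int16","int32","int64","fp16","fp32","fp64","bf16","e4m3","e5m2","int8","f16","f32","f64"] [a, b, c, d] = none := by
          simp [aMatch, PySem.Chars.startswith, List.isPrefixOf, h4, h5, h6, h7, h8, h9, h10, h11, h12, h13]
        rw [h, nrm]
        simp [PySem.Chars.startswith, List.isPrefixOf, h7, h11, h12, h13, ih3]
    -- length ≥ 5
    · have iht : aGo t = nrm t := ih t (by simp at hl ⊢; omega)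
      have ihet : aGo (e::t) = nrm (e::t) := ih (e::t) (by simp at hl ⊢; omega)
      have ihdet : aGo (d::e::t) = nrm (d::e::t) := ih (d::e::t) (by simp at hl ⊢; omega)
      rw [aGo_unfold, htok]
      by_cases h1 : 'i' = a ∧ 'n' = b ∧ 't' = c ∧ '1' = d ∧ '6' = e
      · obtain ⟨rfl, rfl, rfl, rfl, rfl⟩ := h1
        simp [aMatch, PySem.Chars.startswith, List.isPrefixOf, g11, nrm_int16, iht]
      by_cases h2 : 'i' = a ∧ 'n' = b ∧ 't' = c ∧ '3' = d ∧ '2' = e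
      · obtain ⟨rfl, rfl, rfl, rfl, rfl⟩ := h2
        simp [aMatch, PySem.Chars.startswith, List.isPrefixOf, g12, nrm_int32, iht]
      by_cases h3 : 'i' = a ∧ 'n' = b ∧ 't' = c ∧ '6' = d ∧ '4' = e
      · obtain ⟨rfl, rfl, rfl, rfl, rfl⟩ := h3
        simp [aMatch, PySem.Chars.startswith, List.isPrefixOf, g13, nrm_int64, iht]
      by_cases h4 : 'f' = a ∧ 'p' = b ∧ '1' = c ∧ '6' = d
      · obtain ⟨rfl, rfl, rfl, rfl⟩ := h4
        simp [aMatch, PySem.Chars.startswith, List.isPrefixOf, g4, nrm_fp16, ihet]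
      by_cases h5 : 'f' = a ∧ 'p' = b ∧ '3' = c ∧ '2' = d
      · obtain ⟨rfl, rfl, rfl, rfl⟩ := h5
        simp [aMatch, PySem.Chars.startswith, List.isPrefixOf, g5, nrm_fp32, ihet]
      by_cases h6 : 'f' = a ∧ 'p' = b ∧ '6' = c ∧ '4' = d
      · obtain ⟨rfl, rfl, rfl, rfl⟩ := h6
        simp [aMatch, PySem.Chars.startswith, List.isPrefixOf, g6, nrm_fp64, ihet]
      by_cases h7 : 'b' = a ∧ 'f' = b ∧ '1' = c ∧ '6' = d
      · obtain ⟨rfl, rfl, rfl, rfl⟩ := h7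
        simp [aMatch, PySem.Chars.startswith, List.isPrefixOf, g7, nrm_bf16, ihet]
      by_cases h8 : 'e' = a ∧ '4' = b ∧ 'm' = c ∧ '3' = d
      · obtain ⟨rfl, rfl, rfl, rfl⟩ := h8
        simp [aMatch, PySem.Chars.startswith, List.isPrefixOf, g8, nrm_e4m3, ihet]
      by_cases h9 : 'e' = a ∧ '5' = b ∧ 'm' = c ∧ '2' = d
      · obtain ⟨rfl, rfl, rfl, rfl⟩ := h9
        simp [aMatch, PySem.Chars.startswith, List.isPrefixOf, g9, nrm_e5m2, ihet]
      by_cases h10 : 'i' = a ∧ 'n' = b ∧ 't' = c ∧ '8' = d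
      · obtain ⟨rfl, rfl, rfl, rfl⟩ := h10
        simp [aMatch, PySem.Chars.startswith, List.isPrefixOf, g10, nrm_int8, ihet]
      by_cases h11 : 'f' = a ∧ '1' = b ∧ '6' = c
      · obtain ⟨rfl, rfl, rfl⟩ := h11
        simp [aMatch, PySem.Chars.startswith, List.isPrefixOf, g1, nrm_f16, ihdet]
      by_cases h12 : 'f' = a ∧ '3' = b ∧ '2' = c
      · obtain ⟨rfl, rfl, rfl⟩ := h12
        simp [aMatch, PySem.Chars.startswith, List.isPrefixOf, g2, nrm_f32, ihdet]
      by_cases h13 : 'f' = a ∧ '6' = b ∧ '4' = c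
      · obtain ⟨rfl, rfl, rfl⟩ := h13
        simp [aMatch, PySem.Chars.startswith, List.isPrefixOf, g3, nrm_f64, ihdet]
      · have ihr : aGo (b::c::d::e::t) = nrm (b::c::d::e::t) := ih _ (by simp at hl ⊢; omega)
        have h : aMatch ["int16","int32","int64","fp16","fp32","fp64","bf16","e4m3","e5m2","int8","f16","f32","f64"] (a::b::c::d::e::t) = none := by
          simp [aMatch, PySem.Chars.startswith, List.isPrefixOf, h1, h2, h3, h4, h5, h6, h7, h8, h9, h10, h11, h12, h13]
        rw [h, nrm]
        simp [PySem.Chars.startswith, List.isPrefixOf, h7, h11, h12, h13, ihr]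

-- ===== B = norm =====

-- structural (fuel-free) specification of str.replace for a nonempty pattern
def replS (old new : List Char) : List Char → List Char
  | [] => []
  | c :: t =>
      if old.isPrefixOf (c :: t) then new ++ replS old new (t.drop (old.length - 1))
      else c :: replS old new t
termination_by l => l.length
decreasing_by all_goals (simp [List.length_drop]; try omega)

-- structural specification of str.split for a nonempty separator
def splitS (sep : List Char) : List Char → List (List Char)
  | [] => [[]]
  | c :: t =>
      if sep.isPrefixOf (c :: t) then [] :: splitS sep (t.drop (sep.length - 1))
      else match splitS sep t with
           | [] => [[c]]
           | s0 :: ss => (c :: s0) :: ss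
termination_by l => l.length
decreasing_by all_goals (simp [List.length_drop]; try omega)

theorem splitS_ne_nil (sep l) : splitS sep l ≠ [] := by
  rw [splitS.eq_def]
  cases l with
  | nil => simp
  | cons c t =>
    by_cases h : sep.isPrefixOf (c :: t)
    · simp [h]
    · simp [h]
      cases splitS sep t <;> simp

theorem replace_go_spec (old new : List Char) (hold : old ≠ []) :
    ∀ (fuel : Nat) (l acc : List Char), l.length ≤ fuel →
      PySem.Chars.replace.go old new fuel l acc = acc.reverse ++ replS old new l := by
  intro fuel
  induction fuel with
  | zero =>
    intro l acc h
    have : l = [] := by cases l <;> simp_all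
    subst this
    rw [PySem.Chars.replace.go, replS]
  | succ f ih =>
    intro l acc h
    cases l with
    | nil =>
      rw [PySem.Chars.replace.go, replS] <;> simp
    | cons c t =>
      rw [PySem.Chars.replace.go, replS]
      obtain ⟨k, hk⟩ : ∃ k, old.length = k + 1 := by cases old <;> simp_all
      by_cases hp : old.isPrefixOf (c :: t)
      · simp only [hp, if_pos]
        rw [ih _ _ (by simp at h ⊢; omega), hk]
        simp [List.append_assoc]
      · simp only [hp, if_neg, Bool.false_eq_true, not_false_iff]
        rw [ih _ _ (by simp at h ⊢; omega)]
        simp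

theorem chars_replace_eq (l old new : List Char) (hold : old ≠ []) :
    PySem.Chars.replace l old new = replS old new l := by
  have he : old.isEmpty = false := by cases old <;> simp_all
  rw [PySem.Chars.replace]
  simp only [he, Bool.false_eq_true, if_neg, not_false_iff]
  rw [replace_go_spec old new hold _ _ _ le_rfl]
  simp

def consHead (p : List Char) : List (List Char) → List (List Char)
  | [] => [p]
  | x :: xs => (p ++ x) :: xs

theorem splitOn_go_spec (sep : List Char) (hsep : sep ≠ []) :
    ∀ (fuel : Nat) (l cur : List Char) (acc : List (List Char)), l.length < fuel →
      PySem.Chars.splitOn.go sep fuel l cur acc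
        = acc.reverse ++ consHead cur.reverse (splitS sep l) := by
  intro fuel
  induction fuel with
  | zero => intro l cur acc h; omega
  | succ f ih =>
    intro l cur acc h
    cases l with
    | nil =>
      rw [PySem.Chars.splitOn.go, splitS] <;> simp [consHead]
    | cons c t =>
      rw [PySem.Chars.splitOn.go, splitS]
      obtain ⟨k, hk⟩ : ∃ k, sep.length = k + 1 := by cases sep <;> simp_all
      by_cases hp : sep.isPrefixOf (c :: t)
      · simp only [hp, if_pos]
        rw [ih _ _ _ (by simp at h ⊢; omega), hk]
        rcases hs : splitS sep (List.drop k t) with _ | ⟨s0, ss⟩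
        · exact absurd hs (splitS_ne_nil sep _)
        · simp [consHead, hs]
      · simp only [hp, if_neg, Bool.false_eq_true, not_false_iff]
        rw [ih _ _ _ (by simp at h ⊢; omega)]
        rcases hs : splitS sep t with _ | ⟨s0, ss⟩
        · exact absurd hs (splitS_ne_nil sep t)
        · simp [consHead]

theorem chars_splitOn_eq (l sep : List Char) (hsep : sep ≠ []) :
    PySem.Chars.splitOn l sep = splitS sep l := by
  rw [PySem.Chars.splitOn, splitOn_go_spec sep hsep _ _ _ _ (by omega)]
  rcases hs : splitS sep l with _ | ⟨s0, ss⟩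
  · exact absurd hs (splitS_ne_nil sep _)
  · simp [consHead]

-- the head segment of a split is a prefix of the input
theorem splitS_head_prefix (sep : List Char) :
    ∀ (n : Nat) (l s0 : List Char) (ss : List (List Char)),
      l.length ≤ n → splitS sep l = s0 :: ss → s0 <+: l := by
  intro n
  induction n with
  | zero =>
    intro l s0 ss hl hs
    have : l = [] := by cases l <;> simp_all
    subst this
    rw [splitS] at hs
    simp at hs
    simp [hs.1.symm]
  | succ f ih =>
    intro l s0 ss hl hs
    cases l with
    | nil =>
      rw [splitS] at hs
      simp at hs
      have h0 : s0 = [] := by simp_all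
      simp [h0]
    | cons c t =>
      rw [splitS.eq_def] at hs
      by_cases hp : sep.isPrefixOf (c :: t)
      · simp [hp] at hs
        have h0 : s0 = [] := by simp_all
        simp [h0]
      · simp [hp] at hs
        rcases ht : splitS sep t with _ | ⟨t0, ts⟩
        · exact absurd ht (splitS_ne_nil sep t)
        · rw [ht] at hs
          have := ih t t0 ts (by simp at hl; omega) ht
          have h0 : s0 = c :: t0 := by simp_all
          subst h0
          exact List.cons_prefix_cons.mpr ⟨rfl, this⟩

-- abbreviations for the three staged rewrites
def r16 (l : List Char) : List Char := replS ['f','1','6'] ['f','p','1','6'] l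
def r32 (l : List Char) : List Char := replS ['f','3','2'] ['f','p','3','2'] l
def r64 (l : List Char) : List Char := replS ['f','6','4'] ['f','p','6','4'] l
def repl3 (l : List Char) : List Char := r64 (r32 (r16 l))

theorem r16_nil : r16 [] = [] := by rw [r16, replS]
theorem r32_nil : r32 [] = [] := by rw [r32, replS]
theorem r64_nil : r64 [] = [] := by rw [r64, replS]
theorem repl3_nil : repl3 [] = [] := by rw [repl3, r16_nil, r32_nil, r64_nil]

theorem r16_cons (c : Char) (t : List Char) (h : List.isPrefixOf ['f','1','6'] (c :: t) = false) :
    r16 (c :: t) = c :: r16 t := by rw [r16, replS]; simp [h]; rfl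
theorem r32_cons (c : Char) (t : List Char) (h : List.isPrefixOf ['f','3','2'] (c :: t) = false) :
    r32 (c :: t) = c :: r32 t := by rw [r32, replS]; simp [h]; rfl
theorem r64_cons (c : Char) (t : List Char) (h : List.isPrefixOf ['f','6','4'] (c :: t) = false) :
    r64 (c :: t) = c :: r64 t := by rw [r64, replS]; simp [h]; rfl

theorem r16_copy (c : Char) (t : List Char) (h : c ≠ 'f') : r16 (c :: t) = c :: r16 t := by
  apply r16_cons; simp [List.isPrefixOf]; intro h'; exact absurd h'.symm h
theorem r32_copy (c : Char) (t : List Char) (h : c ≠ 'f') : r32 (c :: t) = c :: r32 t := by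
  apply r32_cons; simp [List.isPrefixOf]; intro h'; exact absurd h'.symm h
theorem r64_copy (c : Char) (t : List Char) (h : c ≠ 'f') : r64 (c :: t) = c :: r64 t := by
  apply r64_cons; simp [List.isPrefixOf]; intro h'; exact absurd h'.symm h

theorem r16_f16 (t : List Char) : r16 ('f'::'1'::'6'::t) = 'f'::'p'::'1'::'6':: r16 t := by
  rw [r16, replS]; simp [List.isPrefixOf]; rfl
theorem r32_f32 (t : List Char) : r32 ('f'::'3'::'2'::t) = 'f'::'p'::'3'::'2':: r32 t := by
  rw [r32, replS]; simp [List.isPrefixOf]; rfl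
theorem r64_f64 (t : List Char) : r64 ('f'::'6'::'4'::t) = 'f'::'p'::'6'::'4':: r64 t := by
  rw [r64, replS]; simp [List.isPrefixOf]; rfl

theorem r16_head (l : List Char) : (r16 l).head? = l.head? := by
  cases l with
  | nil => rw [r16_nil]
  | cons c t =>
    by_cases hp : List.isPrefixOf ['f','1','6'] (c :: t)
    · have hc : c = 'f' := by simp [List.isPrefixOf] at hp; exact hp.1.symm
      subst hc; rw [r16, replS]; simp [hp]
    · rw [r16_cons c t (by simp [hp])]; rfl
theorem r32_head (l : List Char) : (r32 l).head? = l.head? := by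
  cases l with
  | nil => rw [r32_nil]
  | cons c t =>
    by_cases hp : List.isPrefixOf ['f','3','2'] (c :: t)
    · have hc : c = 'f' := by simp [List.isPrefixOf] at hp; exact hp.1.symm
      subst hc; rw [r32, replS]; simp [hp]
    · rw [r32_cons c t (by simp [hp])]; rfl

-- pass-through of r32/r64 over the literal outputs "fp16"/"fp32"
theorem r32_pass16 (x : List Char) : r32 ('f'::'p'::'1'::'6'::x) = 'f'::'p'::'1'::'6':: r32 x := by
  rw [r32_cons _ _ (by simp [List.isPrefixOf]), r32_copy _ _ (by decide),
      r32_copy _ _ (by decide), r32_copy _ _ (by decide)]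
theorem r64_pass16 (x : List Char) : r64 ('f'::'p'::'1'::'6'::x) = 'f'::'p'::'1'::'6':: r64 x := by
  rw [r64_cons _ _ (by simp [List.isPrefixOf]), r64_copy _ _ (by decide),
      r64_copy _ _ (by decide), r64_copy _ _ (by decide)]
theorem r64_pass32 (x : List Char) : r64 ('f'::'p'::'3'::'2'::x) = 'f'::'p'::'3'::'2':: r64 x := by
  rw [r64_cons _ _ (by simp [List.isPrefixOf]), r64_copy _ _ (by decide),
      r64_copy _ _ (by decide), r64_copy _ _ (by decide)]

theorem repl3_f16 (x : List Char) : repl3 ('f'::'1'::'6'::x) = 'f'::'p'::'1'::'6':: repl3 x := by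
  rw [repl3, r16_f16, r32_pass16, r64_pass16]; rfl
theorem repl3_f32 (x : List Char) : repl3 ('f'::'3'::'2'::x) = 'f'::'p'::'3'::'2':: repl3 x := by
  rw [repl3, r16_cons _ _ (by simp [List.isPrefixOf]), r16_copy _ _ (by decide),
      r16_copy _ _ (by decide), r32_f32, r64_pass32]; rfl
theorem repl3_f64 (x : List Char) : repl3 ('f'::'6'::'4'::x) = 'f'::'p'::'6'::'4':: repl3 x := by
  rw [repl3, r16_cons _ _ (by simp [List.isPrefixOf]), r16_copy _ _ (by decide),
      r16_copy _ _ (by decide), r32_cons _ _ (by simp [List.isPrefixOf]),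
      r32_copy _ _ (by decide), r32_copy _ _ (by decide), r64_f64]; rfl


theorem join_cons_prepend (sep p x : List Char) (xs : List (List Char)) :
    PySem.Chars.join sep ((p ++ x) :: xs) = p ++ PySem.Chars.join sep (x :: xs) := by
  cases xs <;> simp [PySem.Chars.join, List.intercalate, List.append_assoc]

theorem splitS_cons_ne (sep : List Char) (c : Char) (t s0 : List Char) (ss : List (List Char))
    (h : sep.isPrefixOf (c :: t) = false) (hs : splitS sep t = s0 :: ss) :
    splitS sep (c :: t) = (c :: s0) :: ss := by
  rw [splitS.eq_def]; simp [h, hs]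

theorem join_cons2 (sep x y : List Char) (ys : List (List Char)) :
    PySem.Chars.join sep (x :: y :: ys) = x ++ sep ++ PySem.Chars.join sep (y :: ys) := by
  simp [PySem.Chars.join, List.intercalate, List.append_assoc]

theorem pref_transfer (p : List Char) (c : Char) (s0 t : List Char) (hs : s0 <+: t)
    (hp : List.isPrefixOf p (c :: s0) = true) : List.isPrefixOf p (c :: t) = true := by
  rw [List.isPrefixOf_iff_prefix] at hp ⊢
  cases p with
  | nil => exact List.nil_prefix
  | cons a q =>
    rcases List.cons_prefix_cons.mp hp with ⟨rfl, hq⟩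
    exact List.cons_prefix_cons.mpr ⟨rfl, hq.trans hs⟩

-- two-character head chase through a copying rewrite
theorem chase2 (g : List Char → List Char) (hhead : ∀ u, (g u).head? = u.head?)
    (hcopy : ∀ (c : Char) (u : List Char), c ≠ 'f' → g (c :: u) = c :: g u)
    (a b : Char) (ha : a ≠ 'f') (s0 w : List Char)
    (h : g s0 = a :: b :: w) : ∃ w', s0 = a :: b :: w' := by
  have h1 : s0.head? = some a := by rw [← hhead, h]; rfl
  rcases s0 with _ | ⟨x, s0'⟩
  · simp at h1
  · simp at h1
    subst h1
    rw [hcopy x s0' ha] at h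
    have h2 : s0'.head? = some b := by
      rw [← hhead]
      have := (List.cons.injEq _ _ _ _).mp h
      rw [this.2]; rfl
    rcases s0' with _ | ⟨y, s0''⟩
    · simp at h2
    · simp at h2
      subst h2
      exact ⟨s0'', rfl⟩

theorem bChars_eq_nrm : ∀ (n : Nat) (l : List Char), l.length ≤ n →
    PySem.Chars.join ['b','f','1','6'] ((splitS ['b','f','1','6'] l).map repl3) = nrm l := by
  intro n
  induction n with
  | zero =>
    intro l hl
    have : l = [] := by cases l <;> simp_all
    subst this
    rw [splitS, nrm_nil]
    simp [repl3_nil]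
  | succ f ih =>
    intro l hl
    cases l with
    | nil => rw [splitS, nrm_nil]; simp [repl3_nil]
    | cons c t =>
      by_cases hbf : List.isPrefixOf ['b','f','1','6'] (c :: t)
      · rcases List.isPrefixOf_iff_prefix.mp hbf with ⟨u, hu⟩
        obtain ⟨rfl, h2⟩ : 'b' = c ∧ 'f'::'1'::'6'::u = t := by
          simpa using hu
        subst h2
        rcases hspu : splitS ['b','f','1','6'] u with _ | ⟨s0, ss⟩
        · exact absurd hspu (splitS_ne_nil _ _)
        · have hsl : splitS ['b','f','1','6'] ('b'::'f'::'1'::'6'::u) = [] :: s0 :: ss := by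
            rw [splitS.eq_def]; simp [hbf, hspu]
          rw [hsl, nrm_bf16]
          simp only [List.map_cons, repl3_nil, join_cons2]
          rw [← List.map_cons, ← hspu, ih u (by simp at hl; omega)]
          simp
      · by_cases h1 : List.isPrefixOf ['f','1','6'] (c :: t)
        · rcases List.isPrefixOf_iff_prefix.mp h1 with ⟨u, hu⟩
          obtain ⟨rfl, h2⟩ : 'f' = c ∧ '1'::'6'::u = t := by simpa using hu
          subst h2
          rcases hspu : splitS ['b','f','1','6'] u with _ | ⟨s2, ss2⟩
          · exact absurd hspu (splitS_ne_nil _ _)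
          have hB := splitS_cons_ne ['b','f','1','6'] '6' u s2 ss2 (by simp [List.isPrefixOf]) hspu
          have hC := splitS_cons_ne ['b','f','1','6'] '1' ('6'::u) _ _ (by simp [List.isPrefixOf]) hB
          have hD := splitS_cons_ne ['b','f','1','6'] 'f' ('1'::'6'::u) _ _ (by simp [List.isPrefixOf]) hC
          rw [hD, nrm_f16]
          simp only [List.map_cons, repl3_f16]
          rw [show ('f'::'p'::'1'::'6'::repl3 s2) = ['f','p','1','6'] ++ repl3 s2 from rfl,
                join_cons_prepend ['b','f','1','6'] ['f','p','1','6'] (repl3 s2) (List.map repl3 ss2)]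
          rw [← List.map_cons, ← hspu, ih u (by simp at hl; omega)]
          simp
        · by_cases h2 : List.isPrefixOf ['f','3','2'] (c :: t)
          · rcases List.isPrefixOf_iff_prefix.mp h2 with ⟨u, hu⟩
            obtain ⟨rfl, h3⟩ : 'f' = c ∧ '3'::'2'::u = t := by simpa using hu
            subst h3
            rcases hspu : splitS ['b','f','1','6'] u with _ | ⟨s2, ss2⟩
            · exact absurd hspu (splitS_ne_nil _ _)
            have hB := splitS_cons_ne ['b','f','1','6'] '2' u s2 ss2 (by simp [List.isPrefixOf]) hspu
            have hC := splitS_cons_ne ['b','f','1','6'] '3' ('2'::u) _ _ (by simp [List.isPrefixOf]) hB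
            have hD := splitS_cons_ne ['b','f','1','6'] 'f' ('3'::'2'::u) _ _ (by simp [List.isPrefixOf]) hC
            rw [hD, nrm_f32]
            simp only [List.map_cons, repl3_f32]
            rw [show ('f'::'p'::'3'::'2'::repl3 s2) = ['f','p','3','2'] ++ repl3 s2 from rfl,
                join_cons_prepend ['b','f','1','6'] ['f','p','3','2'] (repl3 s2) (List.map repl3 ss2)]
            rw [← List.map_cons, ← hspu, ih u (by simp at hl; omega)]
            simp
          · by_cases h3 : List.isPrefixOf ['f','6','4'] (c :: t)
            · rcases List.isPrefixOf_iff_prefix.mp h3 with ⟨u, hu⟩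
              obtain ⟨rfl, h4⟩ : 'f' = c ∧ '6'::'4'::u = t := by simpa using hu
              subst h4
              rcases hspu : splitS ['b','f','1','6'] u with _ | ⟨s2, ss2⟩
              · exact absurd hspu (splitS_ne_nil _ _)
              have hB := splitS_cons_ne ['b','f','1','6'] '4' u s2 ss2 (by simp [List.isPrefixOf]) hspu
              have hC := splitS_cons_ne ['b','f','1','6'] '6' ('4'::u) _ _ (by simp [List.isPrefixOf]) hB
              have hD := splitS_cons_ne ['b','f','1','6'] 'f' ('6'::'4'::u) _ _ (by simp [List.isPrefixOf]) hC
              rw [hD, nrm_f64]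
              simp only [List.map_cons, repl3_f64]
              rw [show ('f'::'p'::'6'::'4'::repl3 s2) = ['f','p','6','4'] ++ repl3 s2 from rfl,
                join_cons_prepend ['b','f','1','6'] ['f','p','6','4'] (repl3 s2) (List.map repl3 ss2)]
              rw [← List.map_cons, ← hspu, ih u (by simp at hl; omega)]
              simp
            · -- no pattern at this position: both sides copy c
              rcases hsp : splitS ['b','f','1','6'] t with _ | ⟨s0, ss⟩
              · exact absurd hsp (splitS_ne_nil _ _)
              have hsl := splitS_cons_ne ['b','f','1','6'] c t s0 ss (by simp [hbf]) hsp
              have hpre : s0 <+: t := splitS_head_prefix _ t.length t s0 ss le_rfl hsp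
              -- r16 copies at the head
              have e1 : List.isPrefixOf ['f','1','6'] (c :: s0) = false := by
                cases hx : List.isPrefixOf ['f','1','6'] (c :: s0) with
                | false => rfl
                | true => exact absurd (pref_transfer _ _ _ _ hpre hx) h1
              -- r32 copies at the head of c :: r16 s0
              have e2 : List.isPrefixOf ['f','3','2'] (c :: r16 s0) = false := by
                cases hx : List.isPrefixOf ['f','3','2'] (c :: r16 s0) with
                | false => rfl
                | true =>
                  rcases List.isPrefixOf_iff_prefix.mp hx with ⟨w, hw⟩
                  obtain ⟨rfl, hw2⟩ : 'f' = c ∧ '3'::'2'::w = r16 s0 := by simpa using hw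
                  rcases chase2 r16 r16_head r16_copy '3' '2' (by decide) s0 w hw2.symm with ⟨w', rfl⟩
                  exact absurd (pref_transfer ['f','3','2'] 'f' _ t hpre
                    (by simp [List.isPrefixOf])) h2
              -- r64 copies at the head of c :: r32 (r16 s0)
              have e3 : List.isPrefixOf ['f','6','4'] (c :: r32 (r16 s0)) = false := by
                cases hx : List.isPrefixOf ['f','6','4'] (c :: r32 (r16 s0)) with
                | false => rfl
                | true =>
                  rcases List.isPrefixOf_iff_prefix.mp hx with ⟨w, hw⟩
                  obtain ⟨rfl, hw2⟩ : 'f' = c ∧ '6'::'4'::w = r32 (r16 s0) := by simpa using hw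
                  rcases chase2 (fun u => r32 (r16 u))
                    (fun u => by rw [r32_head, r16_head])
                    (fun a u hne => by show r32 (r16 (a::u)) = a :: r32 (r16 u); rw [r16_copy a u hne, r32_copy a _ hne])
                    '6' '4' (by decide) s0 w hw2.symm with ⟨w', rfl⟩
                  exact absurd (pref_transfer ['f','6','4'] 'f' _ t hpre
                    (by simp [List.isPrefixOf])) h3
              have hr : repl3 (c :: s0) = c :: repl3 s0 := by
                rw [repl3, r16_cons c s0 e1, r32_cons c (r16 s0) e2, r64_cons c (r32 (r16 s0)) e3]
                rfl
              rw [hsl, nrm_cons_of_not c t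
                    (by simpa [PySem.Chars.startswith] using hbf)
                    (by simpa [PySem.Chars.startswith] using h1)
                    (by simpa [PySem.Chars.startswith] using h2)
                    (by simpa [PySem.Chars.startswith] using h3)]
              simp only [List.map_cons, hr]
              have : (c :: repl3 s0) = [c] ++ repl3 s0 := rfl
              rw [this, join_cons_prepend ['b','f','1','6'] [c] (repl3 s0) (List.map repl3 ss)]
              rw [← List.map_cons, ← hsp, ih t (by simp at hl; omega)]
              simp

-- ===== VERDICT (by name: the statement is the Claim_ definition above) =====
set_option maxHeartbeats 1000000 in
theorem normalize_dtype_py_spec : Claim_equal_normalize_dtype_py := by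
  intro raw _
  unfold Spec_normalize_dtype_py normalize_dtype_py normalize_dtype_py_alt
  rw [aGo_eq_nrm (PySem.Str.lower raw).toList.length _ le_rfl,
      ← bChars_eq_nrm (PySem.Str.lower raw).toList.length _ le_rfl]
  rw [PySem.Str.join]
  congr 1
  rw [show ("bf16" : String).toList = ['b','f','1','6'] from by decide]
  rw [chars_splitOn_eq _ _ (by decide), List.map_map]
  have hfun : (String.toList ∘ fun seg =>
      PySem.Str.replace
        (PySem.Str.replace
          (PySem.Str.replace (String.ofList seg) "f16" "fp16") "f32" "fp32") "f64" "fp64")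
      = repl3 := by
    funext seg
    simp only [Function.comp_apply, PySem.Str.toList_replace, String.toList_ofList]
    rw [show ("f16" : String).toList = ['f','1','6'] from by decide,
        show ("fp16" : String).toList = ['f','p','1','6'] from by decide,
        show ("f32" : String).toList = ['f','3','2'] from by decide,
        show ("fp32" : String).toList = ['f','p','3','2'] from by decide,
        show ("f64" : String).toList = ['f','6','4'] from by decide,
        show ("fp64" : String).toList = ['f','p','6','4'] from by decide,
        chars_replace_eq _ _ _ (by decide), chars_replace_eq _ _ _ (by decide),
        chars_replace_eq _ _ _ (by decide)]
    rfl
  rw [hfun]
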